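-- pv_equiv track=rewrite | github.com/pat788/advanced-baccarat-predictor | advanced_baccarat_predictor.py | get_streak
-- ===== SOURCE A (Python) =====
-- def get_streak(data):
--     streaks = []
--     current = None
--     count = 0
--     for value in data:
--         if value == current:
--             count += 1
--         else:
--             count = 1
--             current = value
--         streaks.append(count)
--     return streaks
-- ===== SOURCE B (Python) =====
-- from bisect import bisect_right
--
-- def get_streak(data):
--     # Stage 1: indices where a new run of equal values begins.
--     starts = [i for i in range(len(data)) if i == 0 or data[i] != data[i - 1]]
--     # Stage 2: streak at i = distance to the start of the run containing i, plus 1;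
--     # that start is the largest element of the sorted list `starts` that is <= i.
--     return [i - starts[bisect_right(starts, i) - 1] + 1 for i in range(len(data))]
-- ===== Notes on version B (the rewrite author's own statement) =====
-- stated objective: alternative
-- what changed: B drops the running counter entirely: a first pass collects the sorted run-start indices, then each output is computed as i - (largest run start <= i) + 1, the run start found by binary search (bisect_right).
import Mathlib
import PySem

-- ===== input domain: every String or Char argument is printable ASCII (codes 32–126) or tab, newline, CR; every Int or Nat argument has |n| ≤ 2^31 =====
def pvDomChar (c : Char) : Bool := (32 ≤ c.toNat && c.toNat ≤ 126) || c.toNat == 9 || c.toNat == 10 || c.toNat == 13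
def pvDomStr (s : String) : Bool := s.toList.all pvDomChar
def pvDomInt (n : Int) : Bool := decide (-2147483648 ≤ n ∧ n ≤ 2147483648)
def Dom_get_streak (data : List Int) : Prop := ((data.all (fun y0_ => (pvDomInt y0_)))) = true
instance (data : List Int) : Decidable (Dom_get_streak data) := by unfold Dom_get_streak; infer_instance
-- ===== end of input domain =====

-- B replaces A's running counter with a two-stage index computation: collect run-start
-- indices once, then each streak is i - (largest run start ≤ i) + 1 (alternative).

-- ===== PORT A =====
-- A's loop: state is (current, count); each element appends the updated count.
def getStreakLoop : List Int → Option Int → Int → List Int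
  | [], _, _ => []
  | v :: rest, current, count =>
      let c : Int := if some v = current then count + 1 else 1
      c :: getStreakLoop rest (some v) c

def get_streak (data : List Int) : List Int := getStreakLoop data none 0

-- ===== PORT B =====
-- the comprehension's predicate 'i == 0 or data[i] != data[i-1]' (indices i, i-1 are in range,
-- so getD is exact for data[i] / data[i-1]).
def pvStartPred (data : List Int) (i : Nat) : Bool :=
  i == 0 || !(data.getD i 0 == data.getD (i - 1) 0)

def get_streak_alt (data : List Int) : List Int :=
  let n := data.length
  -- stage 1: run-start indices, in increasing order
  let starts : List Nat := (List.range n).filter (pvStartPred data)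
  -- stage 2: per i, bisect_right starts i = number of elements ≤ i (exact: starts is sorted)
  (List.range n).map (fun i =>
    let k := starts.countP (fun s => decide (s ≤ i))
    (i : Int) - (starts.getD (k - 1) 0 : Nat) + 1)

-- ===== PRECONDITION & SPEC =====
def Spec_get_streak (data : List Int) (out : List Int) : Prop := out = get_streak_alt data
instance (data : List Int) (out : List Int) : Decidable (Spec_get_streak data out) := by unfold Spec_get_streak; infer_instance

-- ===== CLAIM (what is proved, stated in full; the proofs are below) =====
def Claim_equal_get_streak : Prop := ∀ (data : List Int), Dom_get_streak data → Spec_get_streak data (get_streak data)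

-- ===== LEMMAS AND PROOFS =====

-- reference value: streak at position i
def streakAt (data : List Int) : Nat → Int
  | 0 => 1
  | i + 1 => if data.getD (i + 1) 0 = data.getD i 0 then streakAt data i + 1 else 1

-- reference run start at position i
def runStart (data : List Int) : Nat → Nat
  | 0 => 0
  | i + 1 => if pvStartPred data (i + 1) then i + 1 else runStart data i

-- ---- A-side: the loop computes streakAt pointwise ----
theorem loop_inv (data : List Int) : ∀ (xs : List Int) (j : Nat),
    data.drop (j + 1) = xs →
    getStreakLoop xs (some (data.getD j 0)) (streakAt data j) =
      (List.range' (j + 1) xs.length).map (streakAt data) := by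
  intro xs
  induction xs with
  | nil => intro j _; simp [getStreakLoop]
  | cons y ys ih =>
      intro j hdrop
      have hy : data.getD (j + 1) 0 = y := by
        have := congrArg (fun l : List Int => l.getD 0 0) hdrop
        simpa [List.getD_eq_getElem?_getD, List.getElem?_drop] using this
      have hdrop' : data.drop (j + 2) = ys := by
        have := congrArg List.tail hdrop
        simpa [List.tail_drop] using this
      have hstep : (if some y = some (data.getD j 0) then streakAt data j + 1 else 1)
          = streakAt data (j + 1) := by
        by_cases h : data.getD (j + 1) 0 = data.getD j 0
        · simp [streakAt, ← hy]
        · simp [streakAt, ← hy]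
      simp only [getStreakLoop, hstep]
      rw [← hy] at *
      rw [ih (j + 1) hdrop']
      simp [List.range'_succ]

theorem A_eq_map (data : List Int) :
    get_streak data = (List.range data.length).map (streakAt data) := by
  cases data with
  | nil => simp [get_streak, getStreakLoop]
  | cons v xs =>
      have h0 : (v :: xs).getD 0 0 = v := rfl
      have h1 : streakAt (v :: xs) 0 = 1 := rfl
      have hd : (v :: xs).drop 1 = xs := rfl
      have := loop_inv (v :: xs) xs 0 hd
      rw [h0, h1] at this
      show getStreakLoop (v :: xs) none 0 = _
      simp only [getStreakLoop]
      have hne : ¬ (some v = (none : Option Int)) := by simp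
      rw [if_neg hne]
      rw [this]
      rw [List.range_eq_range']
      simp [List.range'_succ, h1]

-- ---- B-side ----
theorem filter_getLast (data : List Int) : ∀ i : Nat,
    ((List.range (i + 1)).filter (pvStartPred data)).getLast? = some (runStart data i) := by
  intro i
  induction i with
  | zero => simp [pvStartPred, runStart]
  | succ i ih =>
      rw [List.range_succ, List.filter_append]
      by_cases h : pvStartPred data (i + 1)
      · simp [h, runStart]
      · simp only [List.filter_cons, List.filter_nil, h]
        simpa [runStart, h] using ih

theorem starts_getD (data : List Int) (i : Nat) (hi : i < data.length) :
    (((List.range data.length).filter (pvStartPred data)).getD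
      ((((List.range data.length).filter (pvStartPred data)).countP
          (fun s => decide (s ≤ i))) - 1) 0) = runStart data i := by
  have hsplit : List.range data.length
      = List.range (i + 1) ++ (List.range (data.length - (i + 1))).map (fun m => i + 1 + m) := by
    have h2 : data.length = (i + 1) + (data.length - (i + 1)) := by omega
    conv_lhs => rw [h2, List.range_add]
  set L := (List.range (i + 1)).filter (pvStartPred data) with hL
  set R := ((List.range (data.length - (i + 1))).map (fun m => i + 1 + m)).filter (pvStartPred data) with hR
  have hfil : (List.range data.length).filter (pvStartPred data) = L ++ R := by
    rw [hsplit, List.filter_append]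
  have hLle : ∀ s ∈ L, s ≤ i := by
    intro s hs
    have := (List.mem_filter.mp hs).1
    exact Nat.lt_succ_iff.mp (List.mem_range.mp this)
  have hRgt : ∀ s ∈ R, ¬ s ≤ i := by
    intro s hs
    have := (List.mem_filter.mp hs).1
    obtain ⟨m, _, hm⟩ := List.mem_map.mp this
    omega
  have hcL : L.countP (fun s => decide (s ≤ i)) = L.length := by
    rw [List.countP_eq_length]
    intro a ha; simpa using hLle a ha
  have hcR : R.countP (fun s => decide (s ≤ i)) = 0 := by
    rw [List.countP_eq_zero]
    intro a ha; simpa using hRgt a ha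
  have hcount : (L ++ R).countP (fun s => decide (s ≤ i)) = L.length := by
    rw [List.countP_append, hcL, hcR]
    omega
  have hL0 : (0 : Nat) ∈ L := by
    refine List.mem_filter.mpr ⟨List.mem_range.mpr (by omega), by simp [pvStartPred]⟩
  have hLlen : 1 ≤ L.length := List.length_pos_of_mem hL0
  rw [hfil, hcount]
  have hidx : L.length - 1 < L.length := by omega
  rw [List.getD_eq_getElem?_getD, List.getElem?_append_left hidx]
  rw [← List.getLast?_eq_getElem?]
  rw [filter_getLast data i]
  rfl

theorem runStart_streak (data : List Int) : ∀ i : Nat,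
    runStart data i ≤ i ∧ ((i : Int) - (runStart data i : Nat) + 1 = streakAt data i) := by
  intro i
  induction i with
  | zero => simp [runStart, streakAt]
  | succ i ih =>
      by_cases h : data.getD (i + 1) 0 = data.getD i 0
      · have h' : data[i + 1]?.getD 0 = data[i]?.getD 0 := by
          simpa [List.getD_eq_getElem?_getD] using h
        have hp : pvStartPred data (i + 1) = false := by
          simp [pvStartPred, h']
        constructor
        · simp only [runStart, hp, if_false, Bool.false_eq_true]
          omega
        · simp only [runStart, streakAt, hp, if_false, Bool.false_eq_true, if_pos h]
          have h2 := ih.2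
          have h1 := ih.1
          push_cast at h2 ⊢
          omega
      · have h' : ¬ data[i + 1]?.getD 0 = data[i]?.getD 0 := by
          simpa [List.getD_eq_getElem?_getD] using h
        have hp : pvStartPred data (i + 1) = true := by
          simp [pvStartPred, h']
        constructor
        · simp [runStart, hp]
        · simp only [runStart, streakAt, hp, if_true, if_neg h]
          push_cast
          ring

theorem B_eq_map (data : List Int) :
    get_streak_alt data = (List.range data.length).map (streakAt data) := by
  unfold get_streak_alt
  apply List.map_congr_left
  intro i hi
  have hin : i < data.length := List.mem_range.mp hi
  simp only []
  rw [starts_getD data i hin]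
  exact (runStart_streak data i).2

-- ===== VERDICT (by name: the statement is the Claim_ definition above) =====
theorem get_streak_spec : Claim_equal_get_streak := by
  intro data _
  unfold Spec_get_streak
  rw [A_eq_map, B_eq_map]
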